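-- pv_equiv track=rewrite | github.com/SeonmeseonStudy/AlgorithmStudy | 김효선/dfs_bfs/day14/게임맵최단거리.py | solution
-- ===== SOURCE A (Python) =====
-- from collections import deque
--
-- def solution(maps):
--     n = len(maps)
--     m = len(maps[0])
--
--     # 방향
--     directions = [(-1, 0), (1, 0), (0, -1), (0, 1)]
--
--     # 큐(x,y,거리)
--     queue = deque([(0, 0, 1)])
--
--     # 중복 방지
--     visited = [[False] * m for _ in range(n)]
--     visited[0][0] = True
--
--     while queue:
--         x, y, dist = queue.popleft()
--
--         # 도착하면 거리 반환
--         if x == n - 1 and y == m - 1: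
--             return dist
--
--         # 4방향
--         for dx, dy in directions:
--             nx, ny = x + dx, y + dy
--
--             # 맵 벗어남x + 벽x + 방문x 일 경우
--             if 0 <= nx < n and 0 <= ny < m and maps[nx][ny] == 1 and not visited[nx][ny]:
--                 visited[nx][ny] = True
--                 queue.append((nx, ny, dist + 1))
--
--     return -1
-- ===== SOURCE B (Python) =====
-- def solution(maps):
--     n, m = len(maps), len(maps[0])
--     visited = [[False] * m for _ in range(n)]
--     visited[0][0] = True
--     d = 1
--     while True:
--         if visited[n - 1][m - 1]:
--             return d
--         new = [(i, j) for i in range(n) for j in range(m)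
--                if not visited[i][j] and maps[i][j] == 1
--                and ((i > 0 and visited[i - 1][j])
--                     or (i + 1 < n and visited[i + 1][j])
--                     or (j > 0 and visited[i][j - 1])
--                     or (j + 1 < m and visited[i][j + 1]))]
--         if not new:
--             return -1
--         for i, j in new:
--             visited[i][j] = True
--         d += 1
-- ===== Notes on version B (the rewrite author's own statement) =====
-- stated objective: alternative
-- what changed: Replaces the BFS queue entirely by a queue-free wavefront fixpoint: each round rescans the whole grid for unvisited open cells adjacent to any visited cell, marks them all, and counts rounds; there is no queue, no frontier list and no per-node distance.
-- outside the precondition, e.g. on solution([[0, 0], [0]]): A returns -1, B raises IndexError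
import Mathlib
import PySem

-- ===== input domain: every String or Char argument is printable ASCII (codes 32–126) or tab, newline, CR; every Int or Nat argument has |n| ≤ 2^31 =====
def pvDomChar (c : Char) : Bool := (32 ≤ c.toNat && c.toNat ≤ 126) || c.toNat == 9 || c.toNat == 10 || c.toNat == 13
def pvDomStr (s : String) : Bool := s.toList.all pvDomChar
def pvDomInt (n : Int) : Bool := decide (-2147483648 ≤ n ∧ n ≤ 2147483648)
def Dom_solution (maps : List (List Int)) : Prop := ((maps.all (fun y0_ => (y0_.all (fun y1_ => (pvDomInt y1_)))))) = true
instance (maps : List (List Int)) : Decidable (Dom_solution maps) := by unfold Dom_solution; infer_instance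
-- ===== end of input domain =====

-- B replaces A's queue BFS by a queue-free wavefront fixpoint: each round rescans the whole
-- grid for unvisited open cells adjacent to a visited cell, marks them all, and counts rounds
-- (objective: alternative algorithm, no queue/frontier/per-node distance; not faster).

-- number of unvisited cells; used only for the termination measures of the loops
def pvCountF (vis : List (List Bool)) : Nat := (vis.map (fun r => r.count false)).sum

lemma pvCountRow_set : ∀ (row : List Bool) (j : Nat), row.getD j true = false →
    (row.set j true).count false + 1 = row.count false := by
  intro row
  induction row with
  | nil => intro j h; simp at h
  | cons b t ih =>
    intro j h
    cases j with
    | zero => simp at h; subst h; simp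
    | succ j =>
      simp only [List.getD_cons_succ] at h
      have := ih j h
      simp only [List.set_cons_succ, List.count_cons]
      omega

lemma pvCountF_set : ∀ (vis : List (List Bool)) (i j : Nat),
    (vis.getD i []).getD j true = false →
    pvCountF (vis.set i ((vis.getD i []).set j true)) + 1 = pvCountF vis := by
  intro vis
  induction vis with
  | nil => intro i j h; simp at h
  | cons r vs ih =>
    intro i j h
    cases i with
    | zero =>
      simp only [List.getD_cons_zero] at h
      have := pvCountRow_set r j h
      simp only [List.getD_cons_zero, List.set_cons_zero, pvCountF, List.map_cons, List.sum_cons]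
      omega
    | succ i =>
      simp only [List.getD_cons_succ] at h
      have := ih i j h
      simp only [List.getD_cons_succ, List.set_cons_succ, pvCountF, List.map_cons, List.sum_cons] at *
      omega

lemma pvCountRow_set_le : ∀ (row : List Bool) (j : Nat),
    (row.set j true).count false ≤ row.count false := by
  intro row
  induction row with
  | nil => intro j; simp
  | cons b t ih =>
    intro j
    cases j with
    | zero => cases b <;> simp
    | succ j =>
      have := ih j
      simp only [List.set_cons_succ, List.count_cons]
      omega

lemma pvCountF_set_le : ∀ (vis : List (List Bool)) (i j : Nat),
    pvCountF (vis.set i ((vis.getD i []).set j true)) ≤ pvCountF vis := by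
  intro vis
  induction vis with
  | nil => intro i j; simp [pvCountF]
  | cons r vs ih =>
    intro i j
    cases i with
    | zero =>
      have := pvCountRow_set_le r j
      simp only [List.getD_cons_zero, List.set_cons_zero, pvCountF, List.map_cons, List.sum_cons]
      omega
    | succ i =>
      have := ih i j
      simp only [List.getD_cons_succ, List.set_cons_succ, pvCountF, List.map_cons, List.sum_cons] at *
      omega

-- ===== PORT A =====
def pvDirs : List (Int × Int) := [(-1, 0), (1, 0), (0, -1), (0, 1)]

-- one direction of A's inner `for dx, dy in directions` loop; state = (visited, queue)
def pvStepA (n m : Int) (maps : List (List Int)) (x y d : Int)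
    (st : List (List Bool) × List (Int × Int × Int)) (dir : Int × Int) :
    List (List Bool) × List (Int × Int × Int) :=
  let nx := x + dir.1
  let ny := y + dir.2
  if 0 ≤ nx ∧ nx < n ∧ 0 ≤ ny ∧ ny < m ∧
      (maps.getD nx.toNat []).getD ny.toNat 0 = 1 ∧
      (st.1.getD nx.toNat []).getD ny.toNat true = false then
    (st.1.set nx.toNat ((st.1.getD nx.toNat []).set ny.toNat true),
     st.2 ++ [(nx, ny, d + 1)])
  else st

lemma pvStepA_inv (n m : Int) (maps : List (List Int)) (x y d : Int)
    (st : List (List Bool) × List (Int × Int × Int)) (dir : Int × Int) :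
    pvCountF (pvStepA n m maps x y d st dir).1 + (pvStepA n m maps x y d st dir).2.length
      = pvCountF st.1 + st.2.length
    ∧ st.2.length ≤ (pvStepA n m maps x y d st dir).2.length := by
  simp only [pvStepA]
  split_ifs with h
  · have := pvCountF_set st.1 (x + dir.1).toNat (y + dir.2).toNat h.2.2.2.2.2
    simp only [List.length_append, List.length_cons, List.length_nil]
    omega
  · omega

lemma pvFoldA_inv (n m : Int) (maps : List (List Int)) (x y d : Int) :
    ∀ (dirs : List (Int × Int)) (st : List (List Bool) × List (Int × Int × Int)),
    pvCountF (List.foldl (pvStepA n m maps x y d) st dirs).1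
        + (List.foldl (pvStepA n m maps x y d) st dirs).2.length
      = pvCountF st.1 + st.2.length
    ∧ st.2.length ≤ (List.foldl (pvStepA n m maps x y d) st dirs).2.length := by
  intro dirs
  induction dirs with
  | nil => intro st; simp
  | cons dir ds ih =>
    intro st
    have h1 := pvStepA_inv n m maps x y d st dir
    have h2 := ih (pvStepA n m maps x y d st dir)
    simp only [List.foldl_cons]
    omega

-- A's `while queue` loop: pop (x, y, dist) from the left, return dist at the target,
-- otherwise push unvisited open neighbours (with dist + 1) on the right
def pvLoopA (n m : Int) (maps : List (List Int)) :
    List (Int × Int × Int) → List (List Bool) → Int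
  | [], _ => -1
  | (x, y, d) :: rest, vis =>
    if x = n - 1 ∧ y = m - 1 then d
    else
      let st := List.foldl (pvStepA n m maps x y d) (vis, rest) pvDirs
      pvLoopA n m maps st.2 st.1
termination_by q vis => 5 * pvCountF vis + q.length
decreasing_by
  have h := pvFoldA_inv n m maps x y d pvDirs (vis, rest)
  dsimp only at h ⊢
  simp only [List.length_cons]
  omega

def solution (maps : List (List Int)) : Int :=
  let n : Int := maps.length
  let m : Int := (maps.getD 0 []).length
  let visited0 := List.replicate maps.length (List.replicate (maps.getD 0 []).length false)
  let visited := visited0.set 0 ((visited0.getD 0 []).set 0 true)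
  pvLoopA n m maps [(0, 0, 1)] visited

-- ===== PORT B =====
-- visited[i][j]; Source B only ever reads in-range cells, the default is never hit there
def pvVisAt (vis : List (List Bool)) (i j : Nat) : Bool := (vis.getD i []).getD j true

-- the comprehension's condition, in Source B's order
def pvNewCell (maps : List (List Int)) (n m : Nat) (vis : List (List Bool)) (i j : Nat) : Bool :=
  !pvVisAt vis i j && ((maps.getD i []).getD j 0 == 1) &&
    ((decide (0 < i) && pvVisAt vis (i - 1) j) ||
     (decide (i + 1 < n) && pvVisAt vis (i + 1) j) ||
     (decide (0 < j) && pvVisAt vis i (j - 1)) ||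
     (decide (j + 1 < m) && pvVisAt vis i (j + 1)))

-- Source B's list comprehension over range(n) × range(m)
def pvScan (maps : List (List Int)) (n m : Nat) (vis : List (List Bool)) : List (Nat × Nat) :=
  (List.range n).flatMap (fun i =>
    ((List.range m).filter (fun j => pvNewCell maps n m vis i j)).map (fun j => (i, j)))

-- Source B's `for i, j in new: visited[i][j] = True`
def pvMark (vis : List (List Bool)) (cs : List (Nat × Nat)) : List (List Bool) :=
  List.foldl (fun v c => v.set c.1 ((v.getD c.1 []).set c.2 true)) vis cs

lemma pvMark_le : ∀ (cs : List (Nat × Nat)) (vis : List (List Bool)),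
    pvCountF (pvMark vis cs) ≤ pvCountF vis := by
  intro cs
  induction cs with
  | nil => intro vis; simp [pvMark]
  | cons c t ih =>
    intro vis
    have h1 := pvCountF_set_le vis c.1 c.2
    have h2 := ih (vis.set c.1 ((vis.getD c.1 []).set c.2 true))
    simp only [pvMark, List.foldl_cons] at *
    omega

lemma pvScan_mem (maps : List (List Int)) (n m : Nat) (vis : List (List Bool)) (a : Nat × Nat) :
    a ∈ pvScan maps n m vis ↔ a.1 < n ∧ a.2 < m ∧ pvNewCell maps n m vis a.1 a.2 = true := by
  obtain ⟨i, j⟩ := a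
  simp only [pvScan, List.mem_flatMap, List.mem_map, List.mem_filter, List.mem_range]
  constructor
  · rintro ⟨i', hi', j', ⟨hj', hc⟩, he⟩
    cases he
    exact ⟨hi', hj', hc⟩
  · rintro ⟨hi, hj, hc⟩
    exact ⟨i, hi, j, ⟨hj, hc⟩, rfl⟩

lemma pvMark_count_lt (vis : List (List Bool)) (c : Nat × Nat) (cs : List (Nat × Nat))
    (hc : pvVisAt vis c.1 c.2 = false) :
    pvCountF (pvMark vis (c :: cs)) < pvCountF vis := by
  have h1 := pvCountF_set vis c.1 c.2 hc
  have h2 := pvMark_le cs (vis.set c.1 ((vis.getD c.1 []).set c.2 true))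
  simp only [pvMark, List.foldl_cons] at *
  omega

lemma pvNewCell_unvis (maps : List (List Int)) (n m : Nat) (vis : List (List Bool)) (i j : Nat)
    (h : pvNewCell maps n m vis i j = true) : pvVisAt vis i j = false := by
  simp only [pvNewCell, Bool.and_assoc, Bool.and_eq_true, Bool.not_eq_true'] at h
  exact h.1

-- Source B's `while True` loop; d is the round counter
def pvWave (maps : List (List Int)) (n m : Nat) (d : Int) (vis : List (List Bool)) : Int :=
  if pvVisAt vis (n - 1) (m - 1) then d
  else
    let new := pvScan maps n m vis
    if h : new = [] then -1
    else pvWave maps n m (d + 1) (pvMark vis new)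
termination_by pvCountF vis
decreasing_by
  obtain ⟨c, cs, hcons⟩ := List.exists_cons_of_ne_nil h
  have hmem : c ∈ pvScan maps n m vis := by
    rw [show pvScan maps n m vis = c :: cs from hcons]; exact List.mem_cons_self
  have hnew := (pvScan_mem maps n m vis c).1 hmem
  have := pvMark_count_lt vis c cs (pvNewCell_unvis maps n m vis c.1 c.2 hnew.2.2)
  simp only [new, hcons]
  omega

def solution_alt (maps : List (List Int)) : Int :=
  let n := maps.length
  let m := (maps.getD 0 []).length
  let visited0 := List.replicate n (List.replicate m false)
  let visited := visited0.set 0 ((visited0.getD 0 []).set 0 true)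
  pvWave maps n m 1 visited

-- ===== PRECONDITION & SPEC =====
-- Pre_ excludes the empty grid and grids whose first row is empty (A's maps[0] / visited[0][0]
-- raises IndexError) and ragged grids with a row shorter than the first: there B's full-grid
-- scan raises IndexError (and A may too, depending on reachability).
def Pre_solution (maps : List (List Int)) : Prop :=
  maps ≠ [] ∧ maps.getD 0 [] ≠ [] ∧ ∀ row ∈ maps, (maps.getD 0 []).length ≤ row.length
instance (maps : List (List Int)) : Decidable (Pre_solution maps) := by
  unfold Pre_solution; infer_instance
def pvWitness_solution : List (List Int) := [[1]]

def Spec_solution (maps : List (List Int)) (out : Int) : Prop := out = solution_alt maps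
instance (maps : List (List Int)) (out : Int) : Decidable (Spec_solution maps out) := by
  unfold Spec_solution; infer_instance

-- ===== CLAIM (what is proved, stated in full; the proofs are below) =====
def Claim_equal_solution : Prop :=
  ∀ (maps : List (List Int)), Dom_solution maps → Pre_solution maps →
    Spec_solution maps (solution maps)

-- ===== LEMMAS AND PROOFS =====

-- intermediate for the proof only: A's BFS processed level by level, cells as Nat pairs
def pvStepL (n m : Int) (maps : List (List Int)) (i j : Nat)
    (st : List (List Bool) × List (Nat × Nat)) (dir : Int × Int) :
    List (List Bool) × List (Nat × Nat) :=
  let nx := (i : Int) + dir.1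
  let ny := (j : Int) + dir.2
  if 0 ≤ nx ∧ nx < n ∧ 0 ≤ ny ∧ ny < m ∧
      (maps.getD nx.toNat []).getD ny.toNat 0 = 1 ∧
      (st.1.getD nx.toNat []).getD ny.toNat true = false then
    (st.1.set nx.toNat ((st.1.getD nx.toNat []).set ny.toNat true),
     st.2 ++ [(nx.toNat, ny.toNat)])
  else st

lemma pvStepL_inv (n m : Int) (maps : List (List Int)) (i j : Nat)
    (st : List (List Bool) × List (Nat × Nat)) (dir : Int × Int) :
    pvCountF (pvStepL n m maps i j st dir).1 + (pvStepL n m maps i j st dir).2.length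
      = pvCountF st.1 + st.2.length
    ∧ st.2.length ≤ (pvStepL n m maps i j st dir).2.length := by
  simp only [pvStepL]
  split_ifs with h
  · have := pvCountF_set st.1 ((i : Int) + dir.1).toNat ((j : Int) + dir.2).toNat h.2.2.2.2.2
    simp only [List.length_append, List.length_cons, List.length_nil]
    omega
  · omega

lemma pvFoldL_inv (n m : Int) (maps : List (List Int)) (i j : Nat) :
    ∀ (dirs : List (Int × Int)) (st : List (List Bool) × List (Nat × Nat)),
    pvCountF (List.foldl (pvStepL n m maps i j) st dirs).1
        + (List.foldl (pvStepL n m maps i j) st dirs).2.length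
      = pvCountF st.1 + st.2.length
    ∧ st.2.length ≤ (List.foldl (pvStepL n m maps i j) st dirs).2.length := by
  intro dirs
  induction dirs with
  | nil => intro st; simp
  | cons dir ds ih =>
    intro st
    have h1 := pvStepL_inv n m maps i j st dir
    have h2 := ih (pvStepL n m maps i j st dir)
    simp only [List.foldl_cons]
    omega

def pvLoopL (n m : Int) (maps : List (List Int)) :
    List (Nat × Nat) → List (Nat × Nat) → Int → List (List Bool) → Int
  | [], [], _, _ => -1
  | [], p :: ps, d, vis => pvLoopL n m maps (p :: ps) [] (d + 1) vis
  | (i, j) :: rest, nxt, d, vis =>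
    if (i : Int) = n - 1 ∧ (j : Int) = m - 1 then d
    else
      let st := List.foldl (pvStepL n m maps i j) (vis, nxt) pvDirs
      pvLoopL n m maps rest st.2 d st.1
termination_by rem nxt _d vis =>
  10 * pvCountF vis + 2 * rem.length + 2 * nxt.length + (if nxt = [] then 0 else 1)
decreasing_by
  · simp
  · have h := pvFoldL_inv n m maps i j pvDirs (vis, nxt)
    have h1 : (if (List.foldl (pvStepL n m maps i j) (vis, nxt) pvDirs).2 = [] then (0:Nat) else 1) ≤ 1 := by
      split <;> omega
    dsimp only at h h1 ⊢
    simp only [List.length_cons]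
    omega

-- accumulator extraction
lemma pvStepA_acc (n m : Int) (maps : List (List Int)) (x y d : Int)
    (vis : List (List Bool)) (q : List (Int × Int × Int)) (dir : Int × Int) :
    pvStepA n m maps x y d (vis, q) dir
      = ((pvStepA n m maps x y d (vis, []) dir).1,
         q ++ (pvStepA n m maps x y d (vis, []) dir).2) := by
  simp only [pvStepA]
  split_ifs with h <;> simp

lemma pvStepL_acc (n m : Int) (maps : List (List Int)) (i j : Nat)
    (vis : List (List Bool)) (q : List (Nat × Nat)) (dir : Int × Int) :
    pvStepL n m maps i j (vis, q) dir
      = ((pvStepL n m maps i j (vis, []) dir).1,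
         q ++ (pvStepL n m maps i j (vis, []) dir).2) := by
  simp only [pvStepL]
  split_ifs with h <;> simp

lemma pvFoldA_acc (n m : Int) (maps : List (List Int)) (x y d : Int) :
    ∀ (dirs : List (Int × Int)) (vis : List (List Bool)) (q : List (Int × Int × Int)),
    List.foldl (pvStepA n m maps x y d) (vis, q) dirs
      = ((List.foldl (pvStepA n m maps x y d) (vis, []) dirs).1,
         q ++ (List.foldl (pvStepA n m maps x y d) (vis, []) dirs).2) := by
  intro dirs
  induction dirs with
  | nil => intro vis q; simp
  | cons dir ds ih =>
    intro vis q
    simp only [List.foldl_cons]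
    rw [pvStepA_acc n m maps x y d vis q dir]
    rw [ih ((pvStepA n m maps x y d (vis, []) dir).1)
          (q ++ (pvStepA n m maps x y d (vis, []) dir).2)]
    rw [ih ((pvStepA n m maps x y d (vis, []) dir).1)
          ((pvStepA n m maps x y d (vis, []) dir).2)]
    conv_rhs => rw [show pvStepA n m maps x y d (vis, []) dir
      = ((pvStepA n m maps x y d (vis, []) dir).1, (pvStepA n m maps x y d (vis, []) dir).2) from rfl]
    simp [List.append_assoc]

lemma pvFoldL_acc (n m : Int) (maps : List (List Int)) (i j : Nat) :
    ∀ (dirs : List (Int × Int)) (vis : List (List Bool)) (q : List (Nat × Nat)),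
    List.foldl (pvStepL n m maps i j) (vis, q) dirs
      = ((List.foldl (pvStepL n m maps i j) (vis, []) dirs).1,
         q ++ (List.foldl (pvStepL n m maps i j) (vis, []) dirs).2) := by
  intro dirs
  induction dirs with
  | nil => intro vis q; simp
  | cons dir ds ih =>
    intro vis q
    simp only [List.foldl_cons]
    rw [pvStepL_acc n m maps i j vis q dir]
    rw [ih ((pvStepL n m maps i j (vis, []) dir).1)
          (q ++ (pvStepL n m maps i j (vis, []) dir).2)]
    rw [ih ((pvStepL n m maps i j (vis, []) dir).1)
          ((pvStepL n m maps i j (vis, []) dir).2)]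
    conv_rhs => rw [show pvStepL n m maps i j (vis, []) dir
      = ((pvStepL n m maps i j (vis, []) dir).1, (pvStepL n m maps i j (vis, []) dir).2) from rfl]
    simp [List.append_assoc]

-- a single A-step is a single L-step with distance d + 1 attached to the pushed cell
lemma pvStep_rel (n m : Int) (maps : List (List Int)) (i j : Nat) (d : Int)
    (vis : List (List Bool)) (dir : Int × Int) :
    pvStepA n m maps (i : Int) (j : Int) d (vis, []) dir
      = ((pvStepL n m maps i j (vis, []) dir).1,
         ((pvStepL n m maps i j (vis, []) dir).2).map
           (fun p => ((p.1 : Int), (p.2 : Int), d + 1))) := by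
  simp only [pvStepA, pvStepL]
  split_ifs with h
  · simp [Int.toNat_of_nonneg h.1, Int.toNat_of_nonneg h.2.2.1]
  · simp

lemma pvFold_rel (n m : Int) (maps : List (List Int)) (i j : Nat) (d : Int) :
    ∀ (dirs : List (Int × Int)) (vis : List (List Bool)),
    List.foldl (pvStepA n m maps (i : Int) (j : Int) d) (vis, []) dirs
      = ((List.foldl (pvStepL n m maps i j) (vis, []) dirs).1,
         ((List.foldl (pvStepL n m maps i j) (vis, []) dirs).2).map
           (fun p => ((p.1 : Int), (p.2 : Int), d + 1))) := by
  intro dirs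
  induction dirs with
  | nil => intro vis; simp
  | cons dir ds ih =>
    intro vis
    simp only [List.foldl_cons]
    rw [pvStep_rel n m maps i j d vis dir]
    rw [pvFoldA_acc n m maps (i : Int) (j : Int) d ds ((pvStepL n m maps i j (vis, []) dir).1)]
    rw [ih ((pvStepL n m maps i j (vis, []) dir).1)]
    rw [pvFoldL_acc n m maps i j ds ((pvStepL n m maps i j (vis, []) dir).1)
          ((pvStepL n m maps i j (vis, []) dir).2)]
    conv_rhs => rw [show pvStepL n m maps i j (vis, []) dir
      = ((pvStepL n m maps i j (vis, []) dir).1, (pvStepL n m maps i j (vis, []) dir).2) from rfl]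
    simp [List.map_append]

-- the simulation: A's queue is always (current level at distance d) ++ (next level at d + 1)
theorem pvSim (n m : Int) (maps : List (List Int)) (rem nxt : List (Nat × Nat)) (d : Int)
    (vis : List (List Bool)) :
    pvLoopA n m maps
        (rem.map (fun p => ((p.1 : Int), (p.2 : Int), d))
          ++ nxt.map (fun p => ((p.1 : Int), (p.2 : Int), d + 1))) vis
      = pvLoopL n m maps rem nxt d vis := by
  match rem, nxt with
  | [], [] =>
    simp only [List.map_nil, List.nil_append]
    rw [pvLoopA.eq_def, pvLoopL.eq_def]
  | [], p :: ps =>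
    have ih := pvSim n m maps (p :: ps) [] (d + 1) vis
    simp only [List.map_nil, List.nil_append, List.append_nil] at ih ⊢
    rw [pvLoopL.eq_def]
    exact ih
  | (i, j) :: rest, nxt =>
    have ih := pvSim n m maps rest
      (nxt ++ (List.foldl (pvStepL n m maps i j) (vis, []) pvDirs).2) d
      ((List.foldl (pvStepL n m maps i j) (vis, []) pvDirs).1)
    simp only [List.map_cons, List.cons_append]
    rw [pvLoopA.eq_def, pvLoopL.eq_def]
    dsimp only
    split_ifs with ht
    · rfl
    · rw [pvFoldA_acc n m maps (i : Int) (j : Int) d pvDirs vis,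
        pvFold_rel n m maps i j d pvDirs vis]
      rw [pvFoldL_acc n m maps i j pvDirs vis nxt]
      dsimp only
      simpa [List.append_assoc, List.map_append] using ih
termination_by 10 * pvCountF vis + 2 * rem.length + 2 * nxt.length + (if nxt = [] then 0 else 1)
decreasing_by
  · simp
  · have h := pvFoldL_inv n m maps i j pvDirs (vis, [])
    have h1 : (if nxt ++ (List.foldl (pvStepL n m maps i j) (vis, []) pvDirs).2 = []
        then (0:Nat) else 1) ≤ 1 := by split <;> omega
    have h2 : (if nxt = [] then (0:Nat) else 1) ≤ 1 := by split <;> omega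
    dsimp only at h h1 h2 ⊢
    simp only [List.length_cons, List.length_append, List.length_nil] at *
    omega

-- pointwise description of marking one cell
lemma pvRowGet : ∀ (l : List Bool) (j k : Nat),
    ((l.set j true)[k]?).getD true = ((l[k]?).getD true || decide (k = j)) := by
  intro l
  induction l with
  | nil => intro j k; simp
  | cons b t ih =>
    intro j k
    cases j with
    | zero => cases k <;> simp
    | succ j =>
      cases k with
      | zero => simp
      | succ k => simpa using ih j k

lemma pvVisAt_mark1 : ∀ (v : List (List Bool)) (a b i j : Nat),
    pvVisAt (v.set a ((v.getD a []).set b true)) i j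
      = (pvVisAt v i j || (decide (i = a) && decide (j = b))) := by
  intro v
  induction v with
  | nil => intro a b i j; simp [pvVisAt]
  | cons r t ih =>
    intro a b i j
    cases a with
    | zero =>
      cases i with
      | zero => simp [pvVisAt, pvRowGet r b j]
      | succ i => simp [pvVisAt]
    | succ a =>
      cases i with
      | zero => simp [pvVisAt]
      | succ i =>
        simpa [pvVisAt, List.getD_cons_succ] using ih a b i j

-- neighbour relation: a is one pvDirs-step from c
def pvAdj (c a : Nat × Nat) : Prop :=
  ∃ dir ∈ pvDirs, (a.1 : Int) = (c.1 : Int) + dir.1 ∧ (a.2 : Int) = (c.2 : Int) + dir.2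

-- whole-level expansion of the level BFS
def pvE (n m : Int) (maps : List (List Int)) (rem : List (Nat × Nat))
    (st : List (List Bool) × List (Nat × Nat)) : List (List Bool) × List (Nat × Nat) :=
  List.foldl (fun st c => List.foldl (pvStepL n m maps c.1 c.2) st pvDirs) st rem

lemma pvL1 (n m : Int) (maps : List (List Int)) :
    ∀ (rem nxt : List (Nat × Nat)) (d : Int) (vis : List (List Bool)),
    (∃ c ∈ rem, (c.1 : Int) = n - 1 ∧ (c.2 : Int) = m - 1) →
    pvLoopL n m maps rem nxt d vis = d := by
  intro rem
  induction rem with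
  | nil => rintro nxt d vis ⟨c, hc, _⟩; simp at hc
  | cons c rest ih =>
    rintro nxt d vis ⟨c', hc', he⟩
    obtain ⟨i, j⟩ := c
    rw [pvLoopL.eq_def]
    dsimp only
    split_ifs with h
    · rfl
    · rcases List.mem_cons.1 hc' with rfl | hmem
      · exact absurd he h
      · exact ih _ _ _ ⟨c', hmem, he⟩

lemma pvL2 (n m : Int) (maps : List (List Int)) (d : Int) :
    ∀ (rem nxt : List (Nat × Nat)) (vis : List (List Bool)),
    (∀ c ∈ rem, ¬((c.1 : Int) = n - 1 ∧ (c.2 : Int) = m - 1)) →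
    pvLoopL n m maps rem nxt d vis
      = pvLoopL n m maps [] (pvE n m maps rem (vis, nxt)).2 d (pvE n m maps rem (vis, nxt)).1 := by
  intro rem
  induction rem with
  | nil => intro nxt vis _; simp [pvE]
  | cons c rest ih =>
    intro nxt vis h
    obtain ⟨i, j⟩ := c
    rw [pvLoopL.eq_def]
    dsimp only
    rw [if_neg (h (i, j) List.mem_cons_self)]
    have := ih (List.foldl (pvStepL n m maps i j) (vis, nxt) pvDirs).2
      (List.foldl (pvStepL n m maps i j) (vis, nxt) pvDirs).1
      (fun c hc => h c (List.mem_cons_of_mem _ hc))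
    rw [this]
    simp [pvE]

-- invariant of a level's expansion relative to the grid vis0 at level start
def pvLInv (maps : List (List Int)) (nN mN : Nat) (f : List (Nat × Nat))
    (vis0 : List (List Bool)) (st : List (List Bool) × List (Nat × Nat)) : Prop :=
  (∀ i j : Nat, pvVisAt st.1 i j = (pvVisAt vis0 i j || decide ((i, j) ∈ st.2))) ∧
  ∀ a ∈ st.2, pvVisAt vis0 a.1 a.2 = false ∧ (maps.getD a.1 []).getD a.2 0 = 1 ∧
    a.1 < nN ∧ a.2 < mN ∧ ∃ c ∈ f, pvAdj c a

lemma pvStepL_linv (maps : List (List Int)) (nN mN : Nat) (f : List (Nat × Nat))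
    (vis0 : List (List Bool)) (c : Nat × Nat) (hc : c ∈ f)
    (st : List (List Bool) × List (Nat × Nat)) (dir : Int × Int) (hdir : dir ∈ pvDirs)
    (H : pvLInv maps nN mN f vis0 st) :
    pvLInv maps nN mN f vis0 (pvStepL (nN : Int) (mN : Int) maps c.1 c.2 st dir) := by
  obtain ⟨HP, HS⟩ := H
  simp only [pvStepL]
  split_ifs with hg
  · constructor
    · intro i j
      rw [pvVisAt_mark1, HP i j]
      simp [List.mem_append, Prod.ext_iff, Bool.or_assoc]
    · intro a ha
      rcases List.mem_append.1 ha with h1 | h2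
      · exact HS a h1
      · have ha' : a = (((c.1 : Int) + dir.1).toNat, ((c.2 : Int) + dir.2).toNat) := by
          simpa using h2
        subst ha'
        have hv0 : pvVisAt vis0 ((c.1 : Int) + dir.1).toNat ((c.2 : Int) + dir.2).toNat = false := by
          have hst : pvVisAt st.1 ((c.1 : Int) + dir.1).toNat ((c.2 : Int) + dir.2).toNat = false :=
            hg.2.2.2.2.2
          have := HP ((c.1 : Int) + dir.1).toNat ((c.2 : Int) + dir.2).toNat
          rw [hst] at this
          exact (Bool.or_eq_false_iff.1 this.symm).1
        refine ⟨hv0, hg.2.2.2.2.1, by omega, by omega, c, hc, dir, hdir, ?_, ?_⟩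
        · dsimp only; rw [Int.toNat_of_nonneg hg.1]
        · dsimp only; rw [Int.toNat_of_nonneg hg.2.2.1]
  · exact ⟨HP, HS⟩

lemma pvFoldDirs_linv (maps : List (List Int)) (nN mN : Nat) (f : List (Nat × Nat))
    (vis0 : List (List Bool)) (c : Nat × Nat) (hc : c ∈ f) :
    ∀ (dirs : List (Int × Int)), (∀ x ∈ dirs, x ∈ pvDirs) →
    ∀ st, pvLInv maps nN mN f vis0 st →
    pvLInv maps nN mN f vis0 (List.foldl (pvStepL (nN : Int) (mN : Int) maps c.1 c.2) st dirs) := by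
  intro dirs
  induction dirs with
  | nil => intro _ st H; simpa using H
  | cons dir ds ih =>
    intro hsub st H
    simp only [List.foldl_cons]
    exact ih (fun x hx => hsub x (List.mem_cons_of_mem _ hx)) _
      (pvStepL_linv maps nN mN f vis0 c hc st dir (hsub dir List.mem_cons_self) H)

lemma pvE_linv (maps : List (List Int)) (nN mN : Nat) (f : List (Nat × Nat))
    (vis0 : List (List Bool)) :
    ∀ (rem : List (Nat × Nat)), (∀ c ∈ rem, c ∈ f) →
    ∀ st, pvLInv maps nN mN f vis0 st →
    pvLInv maps nN mN f vis0 (pvE (nN : Int) (mN : Int) maps rem st) := by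
  intro rem
  induction rem with
  | nil => intro _ st H; simpa [pvE] using H
  | cons c rest ih =>
    intro hsub st H
    simp only [pvE, List.foldl_cons]
    exact ih (fun x hx => hsub x (List.mem_cons_of_mem _ hx)) _
      (pvFoldDirs_linv maps nN mN f vis0 c (hsub c List.mem_cons_self) pvDirs (fun x hx => hx) st H)

lemma pvStepL_mono (n m : Int) (maps : List (List Int)) (x y : Nat)
    (st : List (List Bool) × List (Nat × Nat)) (dir : Int × Int) (i j : Nat)
    (h : pvVisAt st.1 i j = true) : pvVisAt (pvStepL n m maps x y st dir).1 i j = true := by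
  simp only [pvStepL]
  split_ifs with hg
  · dsimp only; rw [pvVisAt_mark1, h]; simp
  · exact h

lemma pvFoldDirs_mono (n m : Int) (maps : List (List Int)) (x y : Nat) :
    ∀ (dirs : List (Int × Int)) (st : List (List Bool) × List (Nat × Nat)) (i j : Nat),
    pvVisAt st.1 i j = true →
    pvVisAt (List.foldl (pvStepL n m maps x y) st dirs).1 i j = true := by
  intro dirs
  induction dirs with
  | nil => intro st i j h; simpa using h
  | cons dir ds ih =>
    intro st i j h
    simp only [List.foldl_cons]
    exact ih _ i j (pvStepL_mono n m maps x y st dir i j h)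

lemma pvE_mono (n m : Int) (maps : List (List Int)) :
    ∀ (rem : List (Nat × Nat)) (st : List (List Bool) × List (Nat × Nat)) (i j : Nat),
    pvVisAt st.1 i j = true → pvVisAt (pvE n m maps rem st).1 i j = true := by
  intro rem
  induction rem with
  | nil => intro st i j h; simpa [pvE] using h
  | cons c rest ih =>
    intro st i j h
    simp only [pvE, List.foldl_cons]
    exact ih _ i j (pvFoldDirs_mono n m maps c.1 c.2 pvDirs st i j h)

lemma pvCell_complete (maps : List (List Int)) (nN mN : Nat) (c a : Nat × Nat)
    (ha1 : a.1 < nN) (ha2 : a.2 < mN) (hopen : (maps.getD a.1 []).getD a.2 0 = 1) :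
    ∀ (dirs : List (Int × Int)) (st : List (List Bool) × List (Nat × Nat)),
    (∃ dir ∈ dirs, (a.1 : Int) = (c.1 : Int) + dir.1 ∧ (a.2 : Int) = (c.2 : Int) + dir.2) →
    pvVisAt (List.foldl (pvStepL (nN : Int) (mN : Int) maps c.1 c.2) st dirs).1 a.1 a.2 = true := by
  intro dirs
  induction dirs with
  | nil => rintro st ⟨dir, hd, _⟩; simp at hd
  | cons dir ds ih =>
    rintro st ⟨dir0, hd0, he1, he2⟩
    rcases List.mem_cons.1 hd0 with rfl | hmem
    · simp only [List.foldl_cons]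
      apply pvFoldDirs_mono
      have h1 : ((c.1 : Int) + dir0.1).toNat = a.1 := by omega
      have h2 : ((c.2 : Int) + dir0.2).toNat = a.2 := by omega
      simp only [pvStepL]
      split_ifs with hg
      · dsimp only
        rw [pvVisAt_mark1]
        simp [h1, h2]
      · cases hv : pvVisAt st.1 a.1 a.2 with
        | true => rfl
        | false =>
          exfalso
          apply hg
          refine ⟨by omega, by omega, by omega, by omega, by rw [h1, h2]; exact hopen, ?_⟩
          rw [h1, h2]
          exact hv
    · simp only [List.foldl_cons]
      exact ih _ ⟨dir0, hmem, he1, he2⟩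

lemma pvE_complete (maps : List (List Int)) (nN mN : Nat) (a : Nat × Nat)
    (ha1 : a.1 < nN) (ha2 : a.2 < mN) (hopen : (maps.getD a.1 []).getD a.2 0 = 1) :
    ∀ (rem : List (Nat × Nat)) (st : List (List Bool) × List (Nat × Nat)) (c : Nat × Nat),
    c ∈ rem → pvAdj c a →
    pvVisAt (pvE (nN : Int) (mN : Int) maps rem st).1 a.1 a.2 = true := by
  intro rem
  induction rem with
  | nil => intro st c hc _; simp at hc
  | cons c0 rest ih =>
    intro st c hc hadj
    rcases List.mem_cons.1 hc with rfl | hmem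
    · obtain ⟨dir, hdir, he1, he2⟩ := hadj
      simp only [pvE, List.foldl_cons]
      exact pvE_mono _ _ maps rest _ a.1 a.2
        (pvCell_complete maps nN mN c a ha1 ha2 hopen pvDirs st ⟨dir, hdir, he1, he2⟩)
    · simp only [pvE, List.foldl_cons]
      exact ih _ c hmem hadj

lemma pvDisj_iff (nN mN : Nat) (vis : List (List Bool)) (i j : Nat)
    (hi : i < nN) (hj : j < mN) :
    ((decide (0 < i) && pvVisAt vis (i - 1) j) ||
     (decide (i + 1 < nN) && pvVisAt vis (i + 1) j) ||
     (decide (0 < j) && pvVisAt vis i (j - 1)) ||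
     (decide (j + 1 < mN) && pvVisAt vis i (j + 1))) = true
    ↔ ∃ c : Nat × Nat, c.1 < nN ∧ c.2 < mN ∧ pvVisAt vis c.1 c.2 = true ∧ pvAdj c (i, j) := by
  simp only [Bool.or_eq_true, Bool.and_eq_true, decide_eq_true_eq]
  constructor
  · rintro (((⟨h1, h2⟩ | ⟨h1, h2⟩) | ⟨h1, h2⟩) | ⟨h1, h2⟩)
    · exact ⟨(i - 1, j), by omega, hj, h2, (1, 0), by simp [pvDirs], by dsimp only; omega,
        by dsimp only; omega⟩
    · exact ⟨(i + 1, j), h1, hj, h2, (-1, 0), by simp [pvDirs], by dsimp only; omega,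
        by dsimp only; omega⟩
    · exact ⟨(i, j - 1), hi, by omega, h2, (0, 1), by simp [pvDirs], by dsimp only; omega,
        by dsimp only; omega⟩
    · exact ⟨(i, j + 1), hi, h1, h2, (0, -1), by simp [pvDirs], by dsimp only; omega,
        by dsimp only; omega⟩
  · rintro ⟨⟨ci, cj⟩, hc1, hc2, hcv, dir, hdir, he1, he2⟩
    dsimp only at hc1 hc2 hcv he1 he2
    simp only [pvDirs, List.mem_cons, List.not_mem_nil, or_false] at hdir
    rcases hdir with rfl | rfl | rfl | rfl
    · dsimp only at he1 he2
      have e1 : ci = i + 1 := by omega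
      have e2 : cj = j := by omega
      subst e1; subst e2
      exact Or.inl (Or.inl (Or.inr ⟨hc1, hcv⟩))
    · dsimp only at he1 he2
      have e1 : ci = i - 1 := by omega
      have e0 : 0 < i := by omega
      have e2 : cj = j := by omega
      subst e1; subst e2
      exact Or.inl (Or.inl (Or.inl ⟨e0, hcv⟩))
    · dsimp only at he1 he2
      have e1 : ci = i := by omega
      have e2 : cj = j + 1 := by omega
      subst e1; subst e2
      exact Or.inr ⟨hc2, hcv⟩
    · dsimp only at he1 he2
      have e1 : ci = i := by omega
      have e0 : 0 < j := by omega
      have e2 : cj = j - 1 := by omega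
      subst e1; subst e2
      exact Or.inl (Or.inr ⟨e0, hcv⟩)

lemma pvScan_iff (maps : List (List Int)) (nN mN : Nat) (f : List (Nat × Nat))
    (vis : List (List Bool))
    (H1 : ∀ c ∈ f, c.1 < nN ∧ c.2 < mN ∧ pvVisAt vis c.1 c.2 = true)
    (H2 : ∀ c : Nat × Nat, c.1 < nN → c.2 < mN → pvVisAt vis c.1 c.2 = true → c ∉ f →
      ∀ a : Nat × Nat, a.1 < nN → a.2 < mN → (maps.getD a.1 []).getD a.2 0 = 1 →
        pvAdj c a → pvVisAt vis a.1 a.2 = true)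
    (a : Nat × Nat) :
    a ∈ pvScan maps nN mN vis
      ↔ (pvVisAt vis a.1 a.2 = false ∧ (maps.getD a.1 []).getD a.2 0 = 1 ∧
         a.1 < nN ∧ a.2 < mN ∧ ∃ c ∈ f, pvAdj c a) := by
  obtain ⟨i, j⟩ := a
  rw [pvScan_mem]
  dsimp only
  constructor
  · rintro ⟨hi, hj, hcell⟩
    simp only [pvNewCell, Bool.and_eq_true, Bool.not_eq_true', beq_iff_eq] at hcell
    obtain ⟨⟨hnv, hop⟩, hdisj⟩ := hcell
    obtain ⟨c, hc1, hc2, hcv, hadj⟩ := (pvDisj_iff nN mN vis i j hi hj).1 hdisj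
    by_cases hcf : c ∈ f
    · exact ⟨hnv, hop, hi, hj, c, hcf, hadj⟩
    · exact absurd (H2 c hc1 hc2 hcv hcf (i, j) hi hj hop hadj) (by simp [hnv])
  · rintro ⟨hnv, hop, hi, hj, c, hcf, hadj⟩
    obtain ⟨hb1, hb2, hcv⟩ := H1 c hcf
    refine ⟨hi, hj, ?_⟩
    simp only [pvNewCell, Bool.and_eq_true, Bool.not_eq_true', beq_iff_eq]
    exact ⟨⟨hnv, hop⟩, (pvDisj_iff nN mN vis i j hi hj).2 ⟨c, hb1, hb2, hcv, hadj⟩⟩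

lemma pvGridGetSet : ∀ (v : List (List Bool)) (a k : Nat) (r : List Bool),
    ((v.set a r).getD k []) = if k = a ∧ a < v.length then r else v.getD k [] := by
  intro v
  induction v with
  | nil => intro a k r; simp
  | cons h t ih =>
    intro a k r
    cases a with
    | zero =>
      cases k with
      | zero => simp
      | succ k => simp
    | succ a =>
      cases k with
      | zero => simp
      | succ k =>
        simp only [List.set_cons_succ, List.getD_cons_succ, List.length_cons]
        rw [ih a k r]
        by_cases h1 : k = a ∧ a < t.length
        · rw [if_pos h1, if_pos ⟨by omega, by omega⟩]
        · rw [if_neg h1, if_neg (by omega)]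

lemma pvMark1_shape (v : List (List Bool)) (a b : Nat) :
    (v.set a ((v.getD a []).set b true)).length = v.length ∧
    ∀ k, ((v.set a ((v.getD a []).set b true)).getD k []).length = (v.getD k []).length := by
  refine ⟨List.length_set, fun k => ?_⟩
  rw [pvGridGetSet]
  by_cases h : k = a ∧ a < v.length
  · rw [if_pos h, List.length_set, h.1]
  · rw [if_neg h]

lemma pvStepL_shape (n m : Int) (maps : List (List Int)) (x y : Nat)
    (st : List (List Bool) × List (Nat × Nat)) (dir : Int × Int) :
    (pvStepL n m maps x y st dir).1.length = st.1.length ∧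
    ∀ k, ((pvStepL n m maps x y st dir).1.getD k []).length = (st.1.getD k []).length := by
  simp only [pvStepL]
  split_ifs with hg
  · exact pvMark1_shape st.1 _ _
  · exact ⟨rfl, fun k => rfl⟩

lemma pvFoldDirs_shape (n m : Int) (maps : List (List Int)) (x y : Nat) :
    ∀ (dirs : List (Int × Int)) (st : List (List Bool) × List (Nat × Nat)),
    (List.foldl (pvStepL n m maps x y) st dirs).1.length = st.1.length ∧
    ∀ k, ((List.foldl (pvStepL n m maps x y) st dirs).1.getD k []).length = (st.1.getD k []).length := by
  intro dirs
  induction dirs with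
  | nil => intro st; exact ⟨rfl, fun k => rfl⟩
  | cons dir ds ih =>
    intro st
    simp only [List.foldl_cons]
    have h1 := pvStepL_shape n m maps x y st dir
    have h2 := ih (pvStepL n m maps x y st dir)
    exact ⟨h2.1.trans h1.1, fun k => (h2.2 k).trans (h1.2 k)⟩

lemma pvE_shape (n m : Int) (maps : List (List Int)) :
    ∀ (rem : List (Nat × Nat)) (st : List (List Bool) × List (Nat × Nat)),
    (pvE n m maps rem st).1.length = st.1.length ∧
    ∀ k, ((pvE n m maps rem st).1.getD k []).length = (st.1.getD k []).length := by
  intro rem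
  induction rem with
  | nil => intro st; exact ⟨rfl, fun k => rfl⟩
  | cons c rest ih =>
    intro st
    simp only [pvE, List.foldl_cons]
    have h1 := pvFoldDirs_shape n m maps c.1 c.2 pvDirs st
    have h2 := ih (List.foldl (pvStepL n m maps c.1 c.2) st pvDirs)
    exact ⟨(h2.1).trans h1.1, fun k => (h2.2 k).trans (h1.2 k)⟩

lemma pvMark_shape : ∀ (cs : List (Nat × Nat)) (v : List (List Bool)),
    (pvMark v cs).length = v.length ∧
    ∀ k, ((pvMark v cs).getD k []).length = (v.getD k []).length := by
  intro cs
  induction cs with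
  | nil => intro v; exact ⟨rfl, fun k => rfl⟩
  | cons c t ih =>
    intro v
    simp only [pvMark, List.foldl_cons]
    have h1 := pvMark1_shape v c.1 c.2
    have h2 := ih (v.set c.1 ((v.getD c.1 []).set c.2 true))
    simp only [pvMark] at h2
    exact ⟨h2.1.trans h1.1, fun k => (h2.2 k).trans (h1.2 k)⟩

lemma pvGridExt (v1 v2 : List (List Bool)) (hlen : v1.length = v2.length)
    (hrow : ∀ k, (v1.getD k []).length = (v2.getD k []).length)
    (hpt : ∀ i j, pvVisAt v1 i j = pvVisAt v2 i j) : v1 = v2 := by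
  apply List.ext_getElem hlen
  intro i h1 h2
  apply List.ext_getElem
  · have := hrow i
    rwa [List.getD_eq_getElem v1 [] h1, List.getD_eq_getElem v2 [] h2] at this
  · intro j hj1 hj2
    have := hpt i j
    unfold pvVisAt at this
    rwa [List.getD_eq_getElem v1 [] h1, List.getD_eq_getElem v2 [] h2,
      List.getD_eq_getElem _ true hj1, List.getD_eq_getElem _ true hj2] at this

lemma pvMark_visAt : ∀ (cs : List (Nat × Nat)) (vis : List (List Bool)) (i j : Nat),
    pvVisAt (pvMark vis cs) i j = (pvVisAt vis i j || decide ((i, j) ∈ cs)) := by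
  intro cs
  induction cs with
  | nil => intro vis i j; simp [pvMark]
  | cons c t ih =>
    intro vis i j
    simp only [pvMark, List.foldl_cons]
    have := ih (vis.set c.1 ((vis.getD c.1 []).set c.2 true)) i j
    simp only [pvMark] at this
    rw [this, pvVisAt_mark1]
    obtain ⟨ci, cj⟩ := c
    simp [Prod.ext_iff, Bool.or_assoc]

lemma pvRepGet (k : Nat) (x : List Bool) : ∀ (i : Nat),
    (List.replicate k x).getD i [] = if i < k then x else [] := by
  induction k with
  | zero => intro i; simp
  | succ k ih =>
    intro i
    cases i with
    | zero => simp [List.replicate_succ]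
    | succ i =>
      simp only [List.replicate_succ, List.getD_cons_succ]
      rw [ih i]
      by_cases h : i < k
      · rw [if_pos h, if_pos (by omega)]
      · rw [if_neg h, if_neg (by omega)]

lemma pvRepRowGet (k : Nat) : ∀ (j : Nat),
    (List.replicate k false).getD j true = if j < k then false else true := by
  induction k with
  | zero => intro j; simp
  | succ k ih =>
    intro j
    cases j with
    | zero => simp [List.replicate_succ]
    | succ j =>
      simp only [List.replicate_succ, List.getD_cons_succ]
      rw [ih j]
      by_cases h : j < k
      · rw [if_pos h, if_pos (by omega)]
      · rw [if_neg h, if_neg (by omega)]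

lemma pvInit_visAt (nN mN : Nat) (i j : Nat) (hi : i < nN) (hj : j < mN) :
    pvVisAt ((List.replicate nN (List.replicate mN false)).set 0
        (((List.replicate nN (List.replicate mN false)).getD 0 []).set 0 true)) i j
      = (decide (i = 0) && decide (j = 0)) := by
  rw [pvVisAt_mark1]
  have h0 : pvVisAt (List.replicate nN (List.replicate mN false)) i j = false := by
    unfold pvVisAt
    rw [pvRepGet nN (List.replicate mN false) i, if_pos hi, pvRepRowGet mN j, if_pos hj]
  rw [h0]
  simp

-- level BFS = wavefront loop, one wave per level
theorem pvLW (maps : List (List Int)) (nN mN : Nat) (hn1 : 1 ≤ nN) (hm1 : 1 ≤ mN)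
    (f : List (Nat × Nat)) (d : Int) (vis : List (List Bool))
    (H1 : ∀ c ∈ f, c.1 < nN ∧ c.2 < mN ∧ pvVisAt vis c.1 c.2 = true)
    (H2 : ∀ c : Nat × Nat, c.1 < nN → c.2 < mN → pvVisAt vis c.1 c.2 = true → c ∉ f →
      ∀ a : Nat × Nat, a.1 < nN → a.2 < mN → (maps.getD a.1 []).getD a.2 0 = 1 →
        pvAdj c a → pvVisAt vis a.1 a.2 = true)
    (H3 : pvVisAt vis (nN - 1) (mN - 1) = true → ((nN - 1, mN - 1) : Nat × Nat) ∈ f) :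
    pvLoopL (nN : Int) (mN : Int) maps f [] d vis = pvWave maps nN mN d vis := by
  by_cases hT : pvVisAt vis (nN - 1) (mN - 1) = true
  · rw [pvWave, if_pos hT]
    exact pvL1 _ _ maps f [] d vis
      ⟨(nN - 1, mN - 1), H3 hT, by dsimp only; omega, by dsimp only; omega⟩
  · have hTf : ∀ c ∈ f, ¬((c.1 : Int) = (nN : Int) - 1 ∧ (c.2 : Int) = (mN : Int) - 1) := by
      rintro ⟨c1, c2⟩ hc ⟨he1, he2⟩
      dsimp only at he1 he2
      have e1 : c1 = nN - 1 := by omega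
      have e2 : c2 = mN - 1 := by omega
      subst e1; subst e2
      exact hT ((H1 _ hc).2.2)
    rw [pvL2 _ _ maps d f [] vis hTf]
    obtain ⟨HP, HS⟩ := pvE_linv maps nN mN f vis f (fun c hc => hc) (vis, [])
      ⟨by intro i j; simp, by intro a ha; simp at ha⟩
    have hmemE : ∀ a : Nat × Nat, a ∈ (pvE (nN : Int) (mN : Int) maps f (vis, [])).2 ↔
        (pvVisAt vis a.1 a.2 = false ∧ (maps.getD a.1 []).getD a.2 0 = 1 ∧
         a.1 < nN ∧ a.2 < mN ∧ ∃ c ∈ f, pvAdj c a) := by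
      rintro ⟨a1, a2⟩
      constructor
      · exact HS (a1, a2)
      · rintro ⟨hv, hop, h1, h2, c, hcf, hadj⟩
        have hvt := pvE_complete maps nN mN (a1, a2) h1 h2 hop f (vis, []) c hcf hadj
        rw [HP a1 a2, hv] at hvt
        simpa using hvt
    have hscan : ∀ a : Nat × Nat, a ∈ pvScan maps nN mN vis ↔
        a ∈ (pvE (nN : Int) (mN : Int) maps f (vis, [])).2 :=
      fun a => (pvScan_iff maps nN mN f vis H1 H2 a).trans (hmemE a).symm
    have hshapeE := pvE_shape (nN : Int) (mN : Int) maps f (vis, [])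
    have hshapeM := pvMark_shape (pvScan maps nN mN vis) vis
    have hgrid : (pvE (nN : Int) (mN : Int) maps f (vis, [])).1
        = pvMark vis (pvScan maps nN mN vis) := by
      apply pvGridExt
      · rw [hshapeE.1, hshapeM.1]
      · intro k; rw [hshapeE.2 k, hshapeM.2 k]
      · intro i j
        rw [HP i j, pvMark_visAt]
        rw [show decide ((i, j) ∈ pvScan maps nN mN vis)
            = decide ((i, j) ∈ (pvE (nN : Int) (mN : Int) maps f (vis, [])).2)
          from decide_eq_decide.mpr (hscan (i, j))]
    rw [pvWave, if_neg hT]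
    cases hs : pvScan maps nN mN vis with
    | nil =>
      have hE2 : (pvE (nN : Int) (mN : Int) maps f (vis, [])).2 = [] := by
        rw [List.eq_nil_iff_forall_not_mem]
        intro a ha
        have := (hscan a).2 ha
        rw [hs] at this
        simp at this
      rw [hE2, pvLoopL.eq_def]
      simp
    | cons c cs =>
      have hcE : c ∈ (pvE (nN : Int) (mN : Int) maps f (vis, [])).2 :=
        (hscan c).1 (by rw [hs]; exact List.mem_cons_self)
      have hcv : pvVisAt vis c.1 c.2 = false := ((hmemE c).1 hcE).1
      obtain ⟨p, ps, hE2⟩ := List.exists_cons_of_ne_nil (List.ne_nil_of_mem hcE)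
      have H1' : ∀ q ∈ (pvE (nN : Int) (mN : Int) maps f (vis, [])).2,
          q.1 < nN ∧ q.2 < mN ∧
          pvVisAt (pvE (nN : Int) (mN : Int) maps f (vis, [])).1 q.1 q.2 = true := by
        intro q hq
        obtain ⟨_, _, hq1, hq2, _⟩ := (hmemE q).1 hq
        refine ⟨hq1, hq2, ?_⟩
        rw [HP q.1 q.2]
        simp [hq]
      have H2' : ∀ c' : Nat × Nat, c'.1 < nN → c'.2 < mN →
          pvVisAt (pvE (nN : Int) (mN : Int) maps f (vis, [])).1 c'.1 c'.2 = true →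
          c' ∉ (pvE (nN : Int) (mN : Int) maps f (vis, [])).2 →
          ∀ a : Nat × Nat, a.1 < nN → a.2 < mN → (maps.getD a.1 []).getD a.2 0 = 1 →
            pvAdj c' a →
            pvVisAt (pvE (nN : Int) (mN : Int) maps f (vis, [])).1 a.1 a.2 = true := by
        intro c' h1 h2 hv hnin a ha1 ha2 hop hadj
        rw [HP c'.1 c'.2] at hv
        have hv0 : pvVisAt vis c'.1 c'.2 = true := by
          rcases Bool.or_eq_true_iff.1 hv with h | h
          · exact h
          · exact absurd (of_decide_eq_true h) (by simpa using hnin)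
        rw [HP a.1 a.2]
        by_cases hva : pvVisAt vis a.1 a.2 = true
        · simp [hva]
        · by_cases hcf : c' ∈ f
          · have : a ∈ (pvE (nN : Int) (mN : Int) maps f (vis, [])).2 :=
              (hmemE a).2 ⟨by simpa using hva, hop, ha1, ha2, c', hcf, hadj⟩
            simp [this]
          · exact absurd (H2 c' h1 h2 hv0 hcf a ha1 ha2 hop hadj) hva
      have H3' : pvVisAt (pvE (nN : Int) (mN : Int) maps f (vis, [])).1 (nN - 1) (mN - 1) = true →
          ((nN - 1, mN - 1) : Nat × Nat) ∈ (pvE (nN : Int) (mN : Int) maps f (vis, [])).2 := by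
        intro hv
        rw [HP (nN - 1) (mN - 1)] at hv
        rcases Bool.or_eq_true_iff.1 hv with h | h
        · exact absurd h hT
        · exact of_decide_eq_true h
      have hrec := pvLW maps nN mN hn1 hm1 (pvE (nN : Int) (mN : Int) maps f (vis, [])).2
        (d + 1) (pvE (nN : Int) (mN : Int) maps f (vis, [])).1 H1' H2' H3'
      rw [hE2] at hrec ⊢
      rw [pvLoopL.eq_def]
      dsimp only
      rw [hrec, hgrid, hs]
      simp
termination_by pvCountF vis
decreasing_by
  have hlt := pvMark_count_lt vis c cs hcv
  rw [hgrid, hs]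
  exact hlt

-- ===== VERDICT (by name: the statement is the Claim_ definition above) =====
theorem solution_spec : Claim_equal_solution := by
  unfold Claim_equal_solution
  intro maps _ hPre
  obtain ⟨hne, hrow, _⟩ := hPre
  unfold Spec_solution solution solution_alt
  have hn1 : 1 ≤ maps.length := List.length_pos_of_ne_nil hne
  have hm1 : 1 ≤ (maps.getD 0 []).length := List.length_pos_of_ne_nil hrow
  have hvis := pvInit_visAt maps.length (maps.getD 0 []).length
  set vis := (List.replicate maps.length (List.replicate (maps.getD 0 []).length false)).set 0
    (((List.replicate maps.length (List.replicate (maps.getD 0 []).length false)).getD 0 []).set 0 true)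
    with hvisdef
  have hsim := pvSim (maps.length : Int) ((maps.getD 0 []).length : Int) maps [(0, 0)] [] 1 vis
  have H1 : ∀ c ∈ ([((0 : Nat), (0 : Nat))] : List (Nat × Nat)),
      c.1 < maps.length ∧ c.2 < (maps.getD 0 []).length ∧ pvVisAt vis c.1 c.2 = true := by
    rintro c hc
    rw [List.mem_singleton] at hc
    subst hc
    refine ⟨hn1, hm1, ?_⟩
    rw [hvis 0 0 hn1 hm1]
    simp
  have H2 : ∀ c : Nat × Nat, c.1 < maps.length → c.2 < (maps.getD 0 []).length →
      pvVisAt vis c.1 c.2 = true → c ∉ ([((0 : Nat), (0 : Nat))] : List (Nat × Nat)) →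
      ∀ a : Nat × Nat, a.1 < maps.length → a.2 < (maps.getD 0 []).length →
        (maps.getD a.1 []).getD a.2 0 = 1 → pvAdj c a → pvVisAt vis a.1 a.2 = true := by
    intro c h1 h2 hv hnin
    rw [hvis c.1 c.2 h1 h2] at hv
    simp only [Bool.and_eq_true, decide_eq_true_eq] at hv
    exfalso
    apply hnin
    rw [List.mem_singleton]
    obtain ⟨c1, c2⟩ := c
    dsimp only at hv
    rw [hv.1, hv.2]
  have H3 : pvVisAt vis (maps.length - 1) ((maps.getD 0 []).length - 1) = true →
      ((maps.length - 1, (maps.getD 0 []).length - 1) : Nat × Nat)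
        ∈ ([((0 : Nat), (0 : Nat))] : List (Nat × Nat)) := by
    intro hv
    rw [hvis _ _ (by omega) (by omega)] at hv
    simp only [Bool.and_eq_true, decide_eq_true_eq] at hv
    rw [List.mem_singleton, hv.1, hv.2]
  have hLW := pvLW maps maps.length ((maps.getD 0 []).length) hn1 hm1
    [((0 : Nat), (0 : Nat))] 1 vis H1 H2 H3
  calc pvLoopA (maps.length : Int) ((maps.getD 0 []).length : Int) maps [(0, 0, 1)] vis
      = pvLoopL (maps.length : Int) ((maps.getD 0 []).length : Int) maps
          [((0 : Nat), (0 : Nat))] [] 1 vis := by simpa using hsim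
    _ = pvWave maps maps.length ((maps.getD 0 []).length) 1 vis := hLW
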